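-- pv_equiv track=rewrite | github.com/kurosawa-kuro/ml-stack-cmi | scripts/evaluation/feature_analysis.py | categorize_feature
-- ===== SOURCE A (Python) =====
-- def categorize_feature(feature_name):
--     """Categorize feature by sensor type"""
--     feature_lower = feature_name.lower()
--
--     if any(x in feature_lower for x in ['acc_x', 'acc_y', 'acc_z']):
--         return 'accelerometer'
--     elif any(x in feature_lower for x in ['gyro_x', 'gyro_y', 'gyro_z']):
--         return 'gyroscope'
--     elif 'tof_' in feature_lower:
--         return 'time_of_flight'
--     elif 'thermopile_' in feature_lower:
--         return 'thermopile'
--     elif any(x in feature_lower for x in ['mean', 'std', 'max', 'min']):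
--         return 'statistical'
--     elif any(x in feature_lower for x in ['fft', 'freq', 'spectral']):
--         return 'frequency'
--     elif 'tsfresh' in feature_lower:
--         return 'tsfresh'
--     else:
--         return 'other'
-- ===== SOURCE B (Python) =====
-- _KEYWORD_CATEGORY = [
--     ('acc_x', 'accelerometer'), ('acc_y', 'accelerometer'), ('acc_z', 'accelerometer'),
--     ('gyro_x', 'gyroscope'), ('gyro_y', 'gyroscope'), ('gyro_z', 'gyroscope'),
--     ('tof_', 'time_of_flight'),
--     ('thermopile_', 'thermopile'),
--     ('mean', 'statistical'), ('std', 'statistical'), ('max', 'statistical'), ('min', 'statistical'),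
--     ('fft', 'frequency'), ('freq', 'frequency'), ('spectral', 'frequency'),
--     ('tsfresh', 'tsfresh'),
-- ]
--
-- _PRIORITY = ['accelerometer', 'gyroscope', 'time_of_flight', 'thermopile',
--              'statistical', 'frequency', 'tsfresh']
--
-- def categorize_feature(feature_name):
--     # Pass 1: scan the string position by position, collecting the set of ALL
--     # categories whose keyword starts at some position (no short-circuiting).
--     s = feature_name.lower()
--     found = set()
--     for i in range(len(s)):
--         for kw, cat in _KEYWORD_CATEGORY:
--             if s.startswith(kw, i):
--                 found.add(cat)
--     # Pass 2: pick the highest-priority category that was found.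
--     for cat in _PRIORITY:
--         if cat in found:
--             return cat
--     return 'other'
-- ===== Notes on version B (the rewrite author's own statement) =====
-- stated objective: alternative
-- what changed: Instead of an if/elif chain of substring-containment tests with early return, B scans the string once position by position collecting the set of all categories whose keyword starts there, then a second pass picks the highest-priority category found.
import Mathlib
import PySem

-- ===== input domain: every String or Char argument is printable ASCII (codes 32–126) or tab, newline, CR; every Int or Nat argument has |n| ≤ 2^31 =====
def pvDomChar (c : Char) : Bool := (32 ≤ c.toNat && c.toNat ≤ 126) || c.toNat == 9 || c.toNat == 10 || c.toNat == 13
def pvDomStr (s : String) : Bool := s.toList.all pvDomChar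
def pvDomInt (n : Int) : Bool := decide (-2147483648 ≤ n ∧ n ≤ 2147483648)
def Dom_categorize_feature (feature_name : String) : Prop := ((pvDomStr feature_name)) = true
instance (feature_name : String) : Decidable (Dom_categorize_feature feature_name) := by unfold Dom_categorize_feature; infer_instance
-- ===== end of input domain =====

-- B replaces A's early-return if/elif substring chain with one positional scan that
-- collects the set of all matched categories, followed by a priority pick (objective: alternative).
-- ===== PORT A =====
def categorize_feature (feature_name : String) : String :=
  let feature_lower := PySem.Str.lower feature_name
  if ["acc_x", "acc_y", "acc_z"].any (fun x => PySem.Str.isIn x feature_lower) then "accelerometer"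
  else if ["gyro_x", "gyro_y", "gyro_z"].any (fun x => PySem.Str.isIn x feature_lower) then "gyroscope"
  else if PySem.Str.isIn "tof_" feature_lower then "time_of_flight"
  else if PySem.Str.isIn "thermopile_" feature_lower then "thermopile"
  else if ["mean", "std", "max", "min"].any (fun x => PySem.Str.isIn x feature_lower) then "statistical"
  else if ["fft", "freq", "spectral"].any (fun x => PySem.Str.isIn x feature_lower) then "frequency"
  else if PySem.Str.isIn "tsfresh" feature_lower then "tsfresh"
  else "other"

-- ===== PORT B =====
def altKeywordCategory : List (List Char × String) :=
  [("acc_x".toList, "accelerometer"), ("acc_y".toList, "accelerometer"), ("acc_z".toList, "accelerometer"),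
   ("gyro_x".toList, "gyroscope"), ("gyro_y".toList, "gyroscope"), ("gyro_z".toList, "gyroscope"),
   ("tof_".toList, "time_of_flight"),
   ("thermopile_".toList, "thermopile"),
   ("mean".toList, "statistical"), ("std".toList, "statistical"), ("max".toList, "statistical"), ("min".toList, "statistical"),
   ("fft".toList, "frequency"), ("freq".toList, "frequency"), ("spectral".toList, "frequency"),
   ("tsfresh".toList, "tsfresh")]

def altPriority : List String :=
  ["accelerometer", "gyroscope", "time_of_flight", "thermopile", "statistical", "frequency", "tsfresh"]

-- s.startswith(kw, i) for 0 ≤ i is exactly kw.isPrefixOf (s.drop i)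
def altFound (s : List Char) : PySem.Set String :=
  (List.range s.length).foldl
    (fun found i =>
      altKeywordCategory.foldl
        (fun found p => if p.1.isPrefixOf (s.drop i) then PySem.Set.add found p.2 else found)
        found)
    PySem.Set.empty

def altPick (found : PySem.Set String) : List String → String
  | [] => "other"
  | cat :: rest => if PySem.Set.contains found cat then cat else altPick found rest

def categorize_feature_alt (feature_name : String) : String :=
  altPick (altFound (PySem.Str.lower feature_name).toList) altPriority

-- ===== PRECONDITION & SPEC =====
def Spec_categorize_feature (feature_name : String) (out : String) : Prop := out = categorize_feature_alt feature_name
instance (feature_name : String) (out : String) : Decidable (Spec_categorize_feature feature_name out) := by unfold Spec_categorize_feature; infer_instance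

-- ===== CLAIM (what is proved, stated in full; the proofs are below) =====
def Claim_equal_categorize_feature : Prop := ∀ (feature_name : String), Dom_categorize_feature feature_name → Spec_categorize_feature feature_name (categorize_feature feature_name)

-- ===== LEMMAS AND PROOFS =====

theorem mem_inner_fold (s : List Char) (i : Nat) (cat : String)
    (ps : List (List Char × String)) (acc : List String) :
    cat ∈ ps.foldl
        (fun found p => if p.1.isPrefixOf (s.drop i) then PySem.Set.add found p.2 else found) acc
      ↔ cat ∈ acc ∨ ∃ p ∈ ps, p.2 = cat ∧ p.1.isPrefixOf (s.drop i) = true := by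
  induction ps generalizing acc with
  | nil => simp
  | cons p rest ih =>
    simp only [List.foldl_cons, List.mem_cons, ih]
    by_cases h : p.1.isPrefixOf (s.drop i) = true
    · simp only [h, if_true, PySem.Set.mem_add]
      constructor
      · rintro ((ha | he) | ⟨p', hp', hc, hpr⟩)
        · exact Or.inl ha
        · exact Or.inr ⟨p, Or.inl rfl, he.symm, h⟩
        · exact Or.inr ⟨p', Or.inr hp', hc, hpr⟩
      · rintro (ha | ⟨p', (rfl | hp'), hc, hpr⟩)
        · exact Or.inl (Or.inl ha)
        · exact Or.inl (Or.inr hc.symm)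
        · exact Or.inr ⟨p', hp', hc, hpr⟩
    · simp only [h, Bool.false_eq_true, if_false]
      constructor
      · rintro (ha | ⟨p', hp', hc, hpr⟩)
        · exact Or.inl ha
        · exact Or.inr ⟨p', Or.inr hp', hc, hpr⟩
      · rintro (ha | ⟨p', (rfl | hp'), hc, hpr⟩)
        · exact Or.inl ha
        · exact absurd hpr h
        · exact Or.inr ⟨p', hp', hc, hpr⟩

theorem mem_outer_fold (s : List Char) (cat : String)
    (is : List Nat) (acc : List String) :
    cat ∈ is.foldl
        (fun found i =>
          altKeywordCategory.foldl
            (fun found p => if p.1.isPrefixOf (s.drop i) then PySem.Set.add found p.2 else found)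
            found) acc
      ↔ cat ∈ acc ∨ ∃ i ∈ is, ∃ p ∈ altKeywordCategory, p.2 = cat ∧ p.1.isPrefixOf (s.drop i) = true := by
  induction is generalizing acc with
  | nil => simp
  | cons i rest ih =>
    simp only [List.foldl_cons, ih, mem_inner_fold, List.mem_cons]
    constructor
    · rintro ((ha | hi) | ⟨i', hi', rest'⟩)
      · exact Or.inl ha
      · exact Or.inr ⟨i, Or.inl rfl, hi⟩
      · exact Or.inr ⟨i', Or.inr hi', rest'⟩
    · rintro (ha | ⟨i', (rfl | hi'), rest'⟩)
      · exact Or.inl (Or.inl ha)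
      · exact Or.inl (Or.inr rest')
      · exact Or.inr ⟨i', hi', rest'⟩

theorem mem_altFound (s : List Char) (cat : String) :
    cat ∈ altFound s ↔
      ∃ i < s.length, ∃ p ∈ altKeywordCategory, p.2 = cat ∧ p.1.isPrefixOf (s.drop i) = true := by
  unfold altFound
  rw [mem_outer_fold]
  simp [PySem.Set.empty, List.mem_range]

theorem prefix_drop_lt {kw s : List Char} {i : Nat}
    (hne : kw ≠ []) (h : kw.isPrefixOf (s.drop i) = true) : i < s.length := by
  by_contra hge
  rw [not_lt] at hge
  rw [List.drop_eq_nil_of_le hge] at h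
  rw [List.isPrefixOf_iff_prefix] at h
  simp [List.prefix_nil] at h
  exact hne h

-- cat's flag in found equals "some keyword of that category occurs as a substring"
theorem found_eq_any (s : List Char) (cat : String) (kws : List String)
    (hne : ∀ kw ∈ kws, kw.toList ≠ [])
    (hcov : ∀ kw ∈ kws, (kw.toList, cat) ∈ altKeywordCategory)
    (honly : ∀ p ∈ altKeywordCategory, p.2 = cat → p.1 ∈ kws.map String.toList) :
    PySem.Set.contains (altFound s) cat =
      kws.any (fun kw => PySem.Chars.isIn kw.toList s) := by
  rw [Bool.eq_iff_iff]
  rw [show (PySem.Set.contains (altFound s) cat = true) ↔ cat ∈ altFound s by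
    simp [PySem.Set.contains], mem_altFound]
  simp only [List.any_eq_true]
  constructor
  · rintro ⟨i, _, p, hp, hpc, hpref⟩
    rcases List.mem_map.mp (honly p hp hpc) with ⟨kw, hkw, hkweq⟩
    refine ⟨kw, hkw, ?_⟩
    rw [← PySem.Chars.exists_prefix_drop_iff_isIn]
    exact ⟨i, by rw [hkweq]; exact (List.isPrefixOf_iff_prefix).mp hpref⟩
  · rintro ⟨kw, hkw, hin⟩
    rcases (PySem.Chars.exists_prefix_drop_iff_isIn _ _).mpr hin with ⟨j, hpref⟩
    have hpref' : kw.toList.isPrefixOf (s.drop j) = true :=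
      (List.isPrefixOf_iff_prefix).mpr hpref
    exact ⟨j, prefix_drop_lt (hne kw hkw) hpref', (kw.toList, cat), hcov kw hkw, rfl, hpref'⟩

-- ===== VERDICT (by name: the statement is the Claim_ definition above) =====
theorem categorize_feature_spec : Claim_equal_categorize_feature := by
  intro feature_name _
  unfold Spec_categorize_feature categorize_feature categorize_feature_alt altPriority
  set s := (PySem.Str.lower feature_name).toList with hs
  have h1 := found_eq_any s "accelerometer" ["acc_x", "acc_y", "acc_z"]
    (by decide) (by decide) (by decide)
  have h2 := found_eq_any s "gyroscope" ["gyro_x", "gyro_y", "gyro_z"]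
    (by decide) (by decide) (by decide)
  have h3 := found_eq_any s "time_of_flight" ["tof_"] (by decide) (by decide) (by decide)
  have h4 := found_eq_any s "thermopile" ["thermopile_"] (by decide) (by decide) (by decide)
  have h5 := found_eq_any s "statistical" ["mean", "std", "max", "min"]
    (by decide) (by decide) (by decide)
  have h6 := found_eq_any s "frequency" ["fft", "freq", "spectral"]
    (by decide) (by decide) (by decide)
  have h7 := found_eq_any s "tsfresh" ["tsfresh"] (by decide) (by decide) (by decide)
  simp only [altPick, h1, h2, h3, h4, h5, h6, h7, List.any_cons, List.any_nil,
    PySem.Str.isIn_eq, ← hs, Bool.or_false]
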